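-- pv_equiv track=rewrite | github.com/mariodemmelbauer/JWR-AKA-Dashboard | aka_dashboard.py | count_goals_in_zone
-- ===== SOURCE A (Python) =====
-- def count_goals_in_zone(goals, zone_name):
--     """Zählt Tore in einer spezifischen Zone"""
--     count = 0
--     for goal in goals:
--         x, y = goal
--         if zone_name == "Goldene Zone":
--             if 25 <= x <= 43 and 84 <= y <= 100:
--                 count += 1
--         elif zone_name == "Zone 14":
--             if 25 <= x <= 43 and 75 <= y < 84:
--                 count += 1
--         elif zone_name == "FDl":
--             if 14 <= x < 25 and 75 <= y <= 84:
--                 count += 1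
--         elif zone_name == "FDr":
--             if 43 < x <= 54 and 75 <= y <= 84:
--                 count += 1
--         elif zone_name == "HFAl":
--             if 0 <= x < 14 and 75 <= y <= 90:
--                 count += 1
--         elif zone_name == "HFAr":
--             if 54 < x <= 68 and 75 <= y <= 90:
--                 count += 1
--         elif zone_name == "ND2l 1/2":
--             if 14 <= x < 25 and 84 < y <= 100:
--                 count += 1
--         elif zone_name == "ND2r 1/2":
--             if 43 < x <= 54 and 84 < y <= 100:
--                 count += 1
--         elif zone_name == "Restliches Spielfeld":
--             # Alle Tore außerhalb der gestrichelten Zonen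
--             in_zone = False
--             if y >= 75:
--                 if (25 <= x <= 43 and 84 <= y <= 100) or \
--                    (25 <= x <= 43 and 75 <= y < 84) or \
--                    (14 <= x < 25 and 75 <= y <= 84) or \
--                    (43 < x <= 54 and 75 <= y <= 84) or \
--                    (0 <= x < 14 and 75 <= y <= 90) or \
--                    (54 < x <= 68 and 75 <= y <= 90) or \
--                    (14 <= x < 25 and 84 < y <= 100) or \
--                    (43 < x <= 54 and 84 < y <= 100):
--                     in_zone = True
--             if not in_zone:
--                 count += 1
--     return count
-- ===== SOURCE B (Python) =====
-- def _classify(x, y):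
--     # Each goal belongs to exactly one zone label: the eight named rectangles
--     # are pairwise disjoint, everything else is "Restliches Spielfeld".
--     if 75 <= y:
--         if 25 <= x <= 43:
--             if y < 84:
--                 return "Zone 14"
--             if y <= 100:
--                 return "Goldene Zone"
--         elif 14 <= x < 25:
--             if y <= 84:
--                 return "FDl"
--             if y <= 100:
--                 return "ND2l 1/2"
--         elif 43 < x <= 54:
--             if y <= 84:
--                 return "FDr"
--             if y <= 100:
--                 return "ND2r 1/2"
--         elif 0 <= x < 14:
--             if y <= 90:
--                 return "HFAl"
--         elif 54 < x <= 68: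
--             if y <= 90:
--                 return "HFAr"
--     return "Restliches Spielfeld"
--
-- def count_goals_in_zone(goals, zone_name):
--     tally = {}
--     for goal in goals:
--         x, y = goal
--         label = _classify(x, y)
--         tally[label] = tally.get(label, 0) + 1
--     return tally.get(zone_name, 0)
-- ===== Notes on version B (the rewrite author's own statement) =====
-- stated objective: alternative
-- what changed: A dispatches on the zone name per goal and tests that zone's rectangle; B inverts this: it classifies every goal by its coordinates into its unique zone label (the eight rectangles are pairwise disjoint, everything else is 'Restliches Spielfeld'), builds a label histogram in one pass, and returns the histogram entry for zone_name.
import Mathlib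
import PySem

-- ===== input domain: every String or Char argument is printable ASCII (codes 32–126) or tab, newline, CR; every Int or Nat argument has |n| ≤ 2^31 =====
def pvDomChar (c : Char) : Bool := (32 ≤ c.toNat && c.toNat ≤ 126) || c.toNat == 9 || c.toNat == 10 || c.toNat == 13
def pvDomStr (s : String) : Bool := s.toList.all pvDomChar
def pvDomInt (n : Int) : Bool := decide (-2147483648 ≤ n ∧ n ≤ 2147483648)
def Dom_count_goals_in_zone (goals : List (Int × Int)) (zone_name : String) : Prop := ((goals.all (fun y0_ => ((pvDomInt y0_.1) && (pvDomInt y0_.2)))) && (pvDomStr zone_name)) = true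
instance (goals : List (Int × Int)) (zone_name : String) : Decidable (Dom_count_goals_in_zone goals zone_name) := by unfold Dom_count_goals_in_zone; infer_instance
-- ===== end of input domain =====

-- B inverts A's dispatch: it classifies each goal by its coordinates into its unique zone
-- label (the eight rectangles are pairwise disjoint), builds a label histogram in one pass,
-- and returns the histogram entry for zone_name (objective: alternative decomposition).

-- ===== PORT A =====
-- literal transliteration of A's loop: per goal, the full if/elif chain on zone_name
def pvALoop (zone_name : String) : List (Int × Int) → Int → Int
  | [], count => count
  | (x, y) :: rest, count =>
    let count' :=
      if zone_name = "Goldene Zone" then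
        if 25 ≤ x ∧ x ≤ 43 ∧ 84 ≤ y ∧ y ≤ 100 then count + 1 else count
      else if zone_name = "Zone 14" then
        if 25 ≤ x ∧ x ≤ 43 ∧ 75 ≤ y ∧ y < 84 then count + 1 else count
      else if zone_name = "FDl" then
        if 14 ≤ x ∧ x < 25 ∧ 75 ≤ y ∧ y ≤ 84 then count + 1 else count
      else if zone_name = "FDr" then
        if 43 < x ∧ x ≤ 54 ∧ 75 ≤ y ∧ y ≤ 84 then count + 1 else count
      else if zone_name = "HFAl" then
        if 0 ≤ x ∧ x < 14 ∧ 75 ≤ y ∧ y ≤ 90 then count + 1 else count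
      else if zone_name = "HFAr" then
        if 54 < x ∧ x ≤ 68 ∧ 75 ≤ y ∧ y ≤ 90 then count + 1 else count
      else if zone_name = "ND2l 1/2" then
        if 14 ≤ x ∧ x < 25 ∧ 84 < y ∧ y ≤ 100 then count + 1 else count
      else if zone_name = "ND2r 1/2" then
        if 43 < x ∧ x ≤ 54 ∧ 84 < y ∧ y ≤ 100 then count + 1 else count
      else if zone_name = "Restliches Spielfeld" then
        let in_zone :=
          if 75 ≤ y then
            if (25 ≤ x ∧ x ≤ 43 ∧ 84 ≤ y ∧ y ≤ 100) ∨
               (25 ≤ x ∧ x ≤ 43 ∧ 75 ≤ y ∧ y < 84) ∨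
               (14 ≤ x ∧ x < 25 ∧ 75 ≤ y ∧ y ≤ 84) ∨
               (43 < x ∧ x ≤ 54 ∧ 75 ≤ y ∧ y ≤ 84) ∨
               (0 ≤ x ∧ x < 14 ∧ 75 ≤ y ∧ y ≤ 90) ∨
               (54 < x ∧ x ≤ 68 ∧ 75 ≤ y ∧ y ≤ 90) ∨
               (14 ≤ x ∧ x < 25 ∧ 84 < y ∧ y ≤ 100) ∨
               (43 < x ∧ x ≤ 54 ∧ 84 < y ∧ y ≤ 100) then True else False
          else False
        if ¬ in_zone then count + 1 else count
      else count
    pvALoop zone_name rest count'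

def count_goals_in_zone (goals : List (Int × Int)) (zone_name : String) : Int :=
  pvALoop zone_name goals 0

-- ===== PORT B =====
-- Source B's _classify: the unique zone label of a coordinate pair
def pvClassify (x y : Int) : String :=
  if 75 ≤ y then
    if 25 ≤ x ∧ x ≤ 43 then
      if y < 84 then "Zone 14"
      else if y ≤ 100 then "Goldene Zone"
      else "Restliches Spielfeld"
    else if 14 ≤ x ∧ x < 25 then
      if y ≤ 84 then "FDl"
      else if y ≤ 100 then "ND2l 1/2"
      else "Restliches Spielfeld"
    else if 43 < x ∧ x ≤ 54 then
      if y ≤ 84 then "FDr"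
      else if y ≤ 100 then "ND2r 1/2"
      else "Restliches Spielfeld"
    else if 0 ≤ x ∧ x < 14 then
      if y ≤ 90 then "HFAl" else "Restliches Spielfeld"
    else if 54 < x ∧ x ≤ 68 then
      if y ≤ 90 then "HFAr" else "Restliches Spielfeld"
    else "Restliches Spielfeld"
  else "Restliches Spielfeld"

def count_goals_in_zone_alt (goals : List (Int × Int)) (zone_name : String) : Int :=
  let tally : PySem.Dict String Int :=
    goals.foldl
      (fun d g =>
        let label := pvClassify g.1 g.2
        d.insert label (d.getD label 0 + 1))
      PySem.Dict.empty
  tally.getD zone_name 0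

-- ===== PRECONDITION & SPEC =====
def Spec_count_goals_in_zone (goals : List (Int × Int)) (zone_name : String) (out : Int) : Prop := out = count_goals_in_zone_alt goals zone_name
instance (goals : List (Int × Int)) (zone_name : String) (out : Int) : Decidable (Spec_count_goals_in_zone goals zone_name out) := by unfold Spec_count_goals_in_zone; infer_instance

-- ===== CLAIM =====
def Claim_equal_count_goals_in_zone : Prop := ∀ (goals : List (Int × Int)) (zone_name : String), Dom_count_goals_in_zone goals zone_name → Spec_count_goals_in_zone goals zone_name (count_goals_in_zone goals zone_name)

-- ===== LEMMAS AND PROOFS =====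

-- characterizations of pvClassify, one per named zone label
theorem classify_gz (x y : Int) : (pvClassify x y = "Goldene Zone") ↔ (25 ≤ x ∧ x ≤ 43 ∧ 84 ≤ y ∧ y ≤ 100) := by
  unfold pvClassify; split_ifs <;> simp_all <;> omega

theorem classify_z14 (x y : Int) : (pvClassify x y = "Zone 14") ↔ (25 ≤ x ∧ x ≤ 43 ∧ 75 ≤ y ∧ y < 84) := by
  unfold pvClassify; split_ifs <;> simp_all <;> omega

theorem classify_fdl (x y : Int) : (pvClassify x y = "FDl") ↔ (14 ≤ x ∧ x < 25 ∧ 75 ≤ y ∧ y ≤ 84) := by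
  unfold pvClassify; split_ifs <;> simp_all <;> omega

theorem classify_fdr (x y : Int) : (pvClassify x y = "FDr") ↔ (43 < x ∧ x ≤ 54 ∧ 75 ≤ y ∧ y ≤ 84) := by
  unfold pvClassify; split_ifs <;> simp_all <;> omega

theorem classify_hfal (x y : Int) : (pvClassify x y = "HFAl") ↔ (0 ≤ x ∧ x < 14 ∧ 75 ≤ y ∧ y ≤ 90) := by
  unfold pvClassify; split_ifs <;> simp_all <;> omega

theorem classify_hfar (x y : Int) : (pvClassify x y = "HFAr") ↔ (54 < x ∧ x ≤ 68 ∧ 75 ≤ y ∧ y ≤ 90) := by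
  unfold pvClassify; split_ifs <;> simp_all <;> omega

theorem classify_nd2l (x y : Int) : (pvClassify x y = "ND2l 1/2") ↔ (14 ≤ x ∧ x < 25 ∧ 84 < y ∧ y ≤ 100) := by
  unfold pvClassify; split_ifs <;> simp_all <;> omega

theorem classify_nd2r (x y : Int) : (pvClassify x y = "ND2r 1/2") ↔ (43 < x ∧ x ≤ 54 ∧ 84 < y ∧ y ≤ 100) := by
  unfold pvClassify; split_ifs <;> simp_all <;> omega

-- pvClassify = "Restliches Spielfeld" exactly on the complement of the eight zones
theorem classify_rest (x y : Int) : (pvClassify x y = "Restliches Spielfeld") ↔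
    ¬(75 ≤ y ∧ ((25 ≤ x ∧ x ≤ 43 ∧ 84 ≤ y ∧ y ≤ 100) ∨
               (25 ≤ x ∧ x ≤ 43 ∧ 75 ≤ y ∧ y < 84) ∨
               (14 ≤ x ∧ x < 25 ∧ 75 ≤ y ∧ y ≤ 84) ∨
               (43 < x ∧ x ≤ 54 ∧ 75 ≤ y ∧ y ≤ 84) ∨
               (0 ≤ x ∧ x < 14 ∧ 75 ≤ y ∧ y ≤ 90) ∨
               (54 < x ∧ x ≤ 68 ∧ 75 ≤ y ∧ y ≤ 90) ∨
               (14 ≤ x ∧ x < 25 ∧ 84 < y ∧ y ≤ 100) ∨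
               (43 < x ∧ x ≤ 54 ∧ 84 < y ∧ y ≤ 100))) := by
  unfold pvClassify; split_ifs <;> simp_all <;> omega

-- pvClassify always returns one of the nine labels
theorem classify_mem (x y : Int) :
    pvClassify x y = "Goldene Zone" ∨ pvClassify x y = "Zone 14" ∨ pvClassify x y = "FDl" ∨
    pvClassify x y = "FDr" ∨ pvClassify x y = "HFAl" ∨ pvClassify x y = "HFAr" ∨
    pvClassify x y = "ND2l 1/2" ∨ pvClassify x y = "ND2r 1/2" ∨
    pvClassify x y = "Restliches Spielfeld" := by
  unfold pvClassify; split_ifs <;> simp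

-- A's per-goal increment is 1 exactly when the goal's unique zone label is zone_name
theorem pvStep_eq (zone_name : String) (x y count : Int) :
    pvALoop zone_name [(x, y)] count =
      count + (if pvClassify x y = zone_name then 1 else 0) := by
  by_cases h1 : zone_name = "Goldene Zone"
  · subst h1; simp only [pvALoop, classify_gz, String.reduceEq, reduceIte]
    split_ifs <;> simp_all <;> omega
  by_cases h2 : zone_name = "Zone 14"
  · subst h2; simp only [pvALoop, classify_z14, String.reduceEq, reduceIte]
    split_ifs <;> simp_all <;> omega
  by_cases h3 : zone_name = "FDl"
  · subst h3; simp only [pvALoop, classify_fdl, String.reduceEq, reduceIte]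
    split_ifs <;> simp_all <;> omega
  by_cases h4 : zone_name = "FDr"
  · subst h4; simp only [pvALoop, classify_fdr, String.reduceEq, reduceIte]
    split_ifs <;> simp_all <;> omega
  by_cases h5 : zone_name = "HFAl"
  · subst h5; simp only [pvALoop, classify_hfal, String.reduceEq, reduceIte]
    split_ifs <;> simp_all <;> omega
  by_cases h6 : zone_name = "HFAr"
  · subst h6; simp only [pvALoop, classify_hfar, String.reduceEq, reduceIte]
    split_ifs <;> simp_all <;> omega
  by_cases h7 : zone_name = "ND2l 1/2"
  · subst h7; simp only [pvALoop, classify_nd2l, String.reduceEq, reduceIte]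
    split_ifs <;> simp_all <;> omega
  by_cases h8 : zone_name = "ND2r 1/2"
  · subst h8; simp only [pvALoop, classify_nd2r, String.reduceEq, reduceIte]
    split_ifs <;> simp_all <;> omega
  by_cases h9 : zone_name = "Restliches Spielfeld"
  · subst h9; simp only [pvALoop, classify_rest, String.reduceEq, reduceIte]
    split_ifs <;> simp_all <;> omega
  · rcases classify_mem x y with h|h|h|h|h|h|h|h|h <;>
      simp [pvALoop, h, h1, h2, h3, h4, h5, h6, h7, h8, h9,
        Ne.symm h1, Ne.symm h2, Ne.symm h3, Ne.symm h4, Ne.symm h5, Ne.symm h6,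
        Ne.symm h7, Ne.symm h8, Ne.symm h9]

-- A's loop counts the goals whose label equals zone_name
theorem pvLoop_eq (zone_name : String) (goals : List (Int × Int)) (count : Int) :
    pvALoop zone_name goals count =
      count + ((goals.map (fun g => pvClassify g.1 g.2)).count zone_name : Int) := by
  induction goals generalizing count with
  | nil => simp [pvALoop]
  | cons g rest ih =>
    obtain ⟨x, y⟩ := g
    have hstep : pvALoop zone_name ((x, y) :: rest) count =
        pvALoop zone_name rest (pvALoop zone_name [(x, y)] count) := rfl
    rw [hstep, pvStep_eq, ih]
    simp only [List.map_cons, List.count_cons, beq_iff_eq]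
    split_ifs <;> push_cast <;> omega

-- B's histogram fold over goals is the counter fold over the label list
theorem pvTally_eq (goals : List (Int × Int)) (d : PySem.Dict String Int) :
    goals.foldl
      (fun d g =>
        let label := pvClassify g.1 g.2
        d.insert label (d.getD label 0 + 1)) d =
    (goals.map (fun g => pvClassify g.1 g.2)).foldl
      (fun d x => d.insert x (d.getD x 0 + 1)) d := by
  rw [List.foldl_map]

-- ===== VERDICT =====
theorem count_goals_in_zone_spec : Claim_equal_count_goals_in_zone := by
  intro goals zone_name _
  unfold Spec_count_goals_in_zone count_goals_in_zone count_goals_in_zone_alt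
  rw [pvLoop_eq, pvTally_eq, PySem.Dict.getD_foldl_insert_add_one]
  simp [PySem.Dict.getD_empty]
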